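-- pv_equiv track=rewrite | github.com/PWinwon/TIL | 03_algorithm/0930/swea_13017.py | erase_zero
-- ===== SOURCE A (Python) =====
-- def erase_zero(s):
--     lst = []
--     check = 0
--     for i in range(len(s) - 1, -1, -1):
--         if s[i] == '1':
--             check = 1
--         if check == 1:
--             lst.append(s[i])
--
--     ret = ""
--     while lst:
--         ret += lst.pop()
--
--     return ret
-- ===== SOURCE B (Python) =====
-- def erase_zero(s):
--     pos = -1
--     for i in range(len(s)):
--         if s[i] == '1':
--             pos = i
--     return ''.join(s[:pos + 1])
-- ===== Notes on version B (the rewrite author's own statement) =====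
-- stated objective: simpler
-- what changed: Replaces A's backward scan that collects kept characters into a stack and then pops them one by one into the result string with a forward pass that only tracks the index of the last matching character and returns a single slice joined into a string.
import Mathlib
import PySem

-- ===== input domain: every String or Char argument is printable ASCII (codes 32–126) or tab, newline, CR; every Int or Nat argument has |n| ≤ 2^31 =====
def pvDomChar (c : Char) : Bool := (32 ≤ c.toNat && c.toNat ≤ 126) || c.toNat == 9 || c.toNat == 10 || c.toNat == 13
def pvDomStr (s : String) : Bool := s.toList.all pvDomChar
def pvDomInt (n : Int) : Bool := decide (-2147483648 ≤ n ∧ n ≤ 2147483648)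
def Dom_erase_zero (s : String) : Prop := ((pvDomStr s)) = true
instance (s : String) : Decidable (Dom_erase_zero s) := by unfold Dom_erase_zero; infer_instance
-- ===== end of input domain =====

-- B replaces A's backward stack-collect-then-pop with a forward pass tracking the last '1' index
-- plus one slice; same O(n) cost, plainer code (objective: simpler).

-- ===== PORT A =====
-- loop body of A's 'for i in range(len(s)-1, -1, -1)' (state = (lst, check))
def eraseZeroBodyA (cs : List Char) (st : List Char × Int) (i : Int) : List Char × Int :=
  let check : Int := if PySem.List.pyGetD cs i ' ' == '1' then 1 else st.2
  let lst := if check == 1 then st.1 ++ [PySem.List.pyGetD cs i ' '] else st.1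
  (lst, check)

-- A's 'while lst: ret += lst.pop()'
def eraseZeroPop (lst ret : List Char) : List Char :=
  if h : lst = [] then ret
  else eraseZeroPop lst.dropLast (ret ++ [lst.getLast h])
termination_by lst.length
decreasing_by
  have := List.length_pos_iff.mpr h
  simp [List.length_dropLast]; omega

def erase_zero (s : String) : String :=
  let cs := s.toList
  let st := (PySem.List.pyRange ((cs.length : Int) - 1) (-1) (-1)).foldl (eraseZeroBodyA cs) ([], 0)
  String.mk (eraseZeroPop st.1 [])

-- ===== PORT B =====
-- loop body of B's 'for i in range(len(s))' (state = pos)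
def eraseZeroBodyB (cs : List Char) (pos : Int) (i : Int) : Int :=
  if PySem.List.pyGetD cs i ' ' == '1' then i else pos

def erase_zero_alt (s : String) : String :=
  let cs := s.toList
  let pos := (PySem.List.pyRange 0 (cs.length : Int) 1).foldl (eraseZeroBodyB cs) (-1)
  String.mk (PySem.List.slice cs none (some (pos + 1)))

-- ===== PRECONDITION & SPEC =====
def Spec_erase_zero (s : String) (out : String) : Prop := out = erase_zero_alt s
instance (s : String) (out : String) : Decidable (Spec_erase_zero s out) := by unfold Spec_erase_zero; infer_instance

-- ===== CLAIM (what is proved, stated in full; the proofs are below) =====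
def Claim_equal_erase_zero : Prop := ∀ (s : String), Dom_erase_zero s → Spec_erase_zero s (erase_zero s)

-- ===== LEMMAS AND PROOFS =====

-- the characters A and B both keep: everything up to and including the last '1'
def eraseZeroSpecList (cs : List Char) : List Char :=
  (cs.reverse.dropWhile (fun c => !(c == '1'))).reverse

theorem eraseZeroPop_eq (lst ret : List Char) : eraseZeroPop lst ret = ret ++ lst.reverse := by
  induction lst using List.reverseRecOn generalizing ret with
  | nil => simp [eraseZeroPop]
  | append_singleton ds c ih =>
      rw [eraseZeroPop]
      simp [ih]

theorem foldA_one (cs : List Char) (m : Nat) (hm : m ≤ cs.length) (lst : List Char) :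
    (PySem.List.pyRange ((m : Int) - 1) (-1) (-1)).foldl (eraseZeroBodyA cs) (lst, 1)
      = (lst ++ (cs.take m).reverse, 1) := by
  induction m generalizing lst with
  | zero => simp [PySem.List.pyRange_neg_one_eq_nil]
  | succ m ih =>
      have hlt : m < cs.length := by omega
      rw [show ((m + 1 : Nat) : Int) - 1 = (m : Int) by push_cast; ring,
          PySem.List.pyRange_neg_one_cons (by omega)]
      simp only [List.foldl_cons]
      have hbody : eraseZeroBodyA cs (lst, 1) (m : Int) = (lst ++ [cs[m]], 1) := by
        simp [eraseZeroBodyA, PySem.List.pyGetD_natCast, List.getD_eq_getElem?_getD,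
          List.getElem?_eq_getElem hlt]
      have htake : cs.take (m + 1) = cs.take m ++ [cs[m]] := by
        rw [List.take_add_one, List.getElem?_eq_getElem hlt]; simp
      have hrev : (cs.take (m + 1)).reverse = cs[m] :: (cs.take m).reverse := by
        rw [htake]; simp
      rw [hbody, ih (by omega), hrev]
      simp

theorem foldA_zero (cs : List Char) (m : Nat) (hm : m ≤ cs.length) :
    ((PySem.List.pyRange ((m : Int) - 1) (-1) (-1)).foldl (eraseZeroBodyA cs) ([], 0)).1
      = (cs.take m).reverse.dropWhile (fun c => !(c == '1')) := by
  induction m with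
  | zero => simp [PySem.List.pyRange_neg_one_eq_nil]
  | succ m ih =>
      have hlt : m < cs.length := by omega
      rw [show ((m + 1 : Nat) : Int) - 1 = (m : Int) by push_cast; ring,
          PySem.List.pyRange_neg_one_cons (by omega)]
      simp only [List.foldl_cons]
      have hget : PySem.List.pyGetD cs (m : Int) ' ' = cs[m] := by
        simp [PySem.List.pyGetD_natCast, List.getD_eq_getElem?_getD, List.getElem?_eq_getElem hlt]
      have htake : cs.take (m + 1) = cs.take m ++ [cs[m]] := by
        rw [List.take_add_one, List.getElem?_eq_getElem hlt]; simp
      have hrev : (cs.take (m + 1)).reverse = cs[m] :: (cs.take m).reverse := by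
        rw [htake]; simp
      by_cases h1 : cs[m] = '1'
      · have hbody : eraseZeroBodyA cs ([], 0) (m : Int) = ([cs[m]], 1) := by
          simp [eraseZeroBodyA, hget, h1]
        rw [hbody, foldA_one cs m (by omega) [cs[m]], hrev, List.dropWhile_cons]
        simp [h1]
      · have hbody : eraseZeroBodyA cs ([], 0) (m : Int) = ([], 0) := by
          simp [eraseZeroBodyA, hget, h1]
        rw [hbody, ih (by omega), hrev, List.dropWhile_cons]
        simp [h1]

theorem foldB_inv (cs : List Char) (m : Nat) (hm : m ≤ cs.length) :
    -1 ≤ (PySem.List.pyRange 0 (m : Int) 1).foldl (eraseZeroBodyB cs) (-1) ∧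
    cs.take ((PySem.List.pyRange 0 (m : Int) 1).foldl (eraseZeroBodyB cs) (-1) + 1).toNat
      = ((cs.take m).reverse.dropWhile (fun c => !(c == '1'))).reverse := by
  induction m with
  | zero => simp
  | succ m ih =>
      have hlt : m < cs.length := by omega
      have hget : PySem.List.pyGetD cs (m : Int) ' ' = cs[m] := by
        simp [PySem.List.pyGetD_natCast, List.getD_eq_getElem?_getD, List.getElem?_eq_getElem hlt]
      have htake : cs.take (m + 1) = cs.take m ++ [cs[m]] := by
        rw [List.take_add_one, List.getElem?_eq_getElem hlt]; simp
      have hrev : (cs.take (m + 1)).reverse = cs[m] :: (cs.take m).reverse := by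
        rw [htake]; simp
      rw [show ((m + 1 : Nat) : Int) = (m : Int) + 1 by push_cast; ring,
          PySem.List.pyRange_one_succ_right (by omega), List.foldl_append]
      simp only [List.foldl_cons, List.foldl_nil]
      obtain ⟨hge, hih⟩ := ih (by omega)
      by_cases h1 : cs[m] = '1'
      · rw [show eraseZeroBodyB cs ((PySem.List.pyRange 0 (m : Int) 1).foldl (eraseZeroBodyB cs) (-1)) (m : Int) = (m : Int) by
            simp [eraseZeroBodyB, hget, h1]]
        refine ⟨by omega, ?_⟩
        rw [show ((m : Int) + 1).toNat = m + 1 by omega, htake]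
        simp [List.dropWhile_cons, h1]
      · rw [show eraseZeroBodyB cs ((PySem.List.pyRange 0 (m : Int) 1).foldl (eraseZeroBodyB cs) (-1)) (m : Int)
            = (PySem.List.pyRange 0 (m : Int) 1).foldl (eraseZeroBodyB cs) (-1) by
            simp [eraseZeroBodyB, hget, h1]]
        refine ⟨hge, ?_⟩
        rw [hih, hrev, List.dropWhile_cons]
        simp [h1]

theorem eraseA (s : String) : erase_zero s = String.mk (eraseZeroSpecList s.toList) := by
  unfold erase_zero eraseZeroSpecList
  have h := foldA_zero s.toList s.toList.length le_rfl
  rw [List.take_length] at h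
  simp only []
  rw [eraseZeroPop_eq, h]
  simp

theorem eraseB (s : String) : erase_zero_alt s = String.mk (eraseZeroSpecList s.toList) := by
  unfold erase_zero_alt eraseZeroSpecList
  obtain ⟨hge, hih⟩ := foldB_inv s.toList s.toList.length le_rfl
  rw [List.take_length] at hih
  simp only []
  set q := (PySem.List.pyRange 0 (s.toList.length : Int) 1).foldl (eraseZeroBodyB s.toList) (-1) with hq
  rw [show q + 1 = ((q + 1).toNat : Int) by omega, PySem.List.slice_to_natCast]
  rw [hih]

-- ===== VERDICT (by name: the statement is the Claim_ definition above) =====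
theorem erase_zero_spec : Claim_equal_erase_zero := by
  intro s _
  unfold Spec_erase_zero
  rw [eraseA, eraseB]
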